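-- pv_equiv track=rewrite | github.com/kingAnthonyDLC/AgenteIA | app.py | simplificar_termino_grupo
-- ===== SOURCE A (Python) =====
-- def simplificar_termino_grupo(celdas, entradas, tabla):
--     filas_grupo = [tabla[i] for i in celdas]
--     termino     = ""
--     for var in entradas:
--         valores = set(f[var] for f in filas_grupo)
--         if len(valores) == 1:
--             v        = list(valores)[0]
--             termino += var if v == 1 else f"{var}'"
--     return termino if termino else "1"
-- ===== SOURCE B (Python) =====
-- def simplificar_termino_grupo(celdas, entradas, tabla):
--     if not celdas:
--         return "1"
--     filas = [tabla[i] for i in celdas]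
--     comun = {(var, filas[0][var]) for var in entradas}
--     for f in filas[1:]:
--         comun &= {(var, f[var]) for var in entradas}
--     const = dict(comun)
--     partes = [var if const[var] == 1 else var + "'" for var in entradas if var in const]
--     termino = "".join(partes)
--     return termino if termino else "1"
-- ===== Notes on version B (the rewrite author's own statement) =====
-- stated objective: alternative
-- what changed: Instead of scanning all selected rows once per variable to collect its value set, B intersects the per-row sets of (variable, value) pairs row by row (seeded with the first row) and reads the constant variables off the surviving pairs.
import Mathlib
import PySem

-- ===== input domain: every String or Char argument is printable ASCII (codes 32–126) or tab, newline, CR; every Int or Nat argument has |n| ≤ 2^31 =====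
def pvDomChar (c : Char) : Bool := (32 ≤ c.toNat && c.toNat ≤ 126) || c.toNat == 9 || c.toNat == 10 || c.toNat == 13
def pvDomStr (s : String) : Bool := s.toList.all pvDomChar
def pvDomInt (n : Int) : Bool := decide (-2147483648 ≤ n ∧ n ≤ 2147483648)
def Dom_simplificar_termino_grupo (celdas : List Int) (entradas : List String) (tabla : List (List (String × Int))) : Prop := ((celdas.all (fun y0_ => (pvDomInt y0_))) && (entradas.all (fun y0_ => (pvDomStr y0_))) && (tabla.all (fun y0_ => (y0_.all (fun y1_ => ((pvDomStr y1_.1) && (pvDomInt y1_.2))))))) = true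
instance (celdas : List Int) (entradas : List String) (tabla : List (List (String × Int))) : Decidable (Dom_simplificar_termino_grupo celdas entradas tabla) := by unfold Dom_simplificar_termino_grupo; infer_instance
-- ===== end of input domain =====

-- B replaces A's per-variable scan over all group rows by a single row-by-row intersection of
-- (variable, value) pair sets; objective: alternative (a different traversal of the same data).

-- shared helpers (each is one Python expression):
-- tabla[i]  (total form; Pre_ guarantees the index is in range)
def pvFila (tabla : List (List (String × Int))) (i : Int) : List (String × Int) :=
  (PySem.List.pyGet? tabla i).getD []
-- f[var]: assoc-list lookup, first match (dict → List (K × V) per the type convention)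
def pvLook? (d : List (String × Int)) (k : String) : Option Int :=
  (d.find? (fun p => p.1 == k)).map (fun p => p.2)
-- f[var]  (total form; Pre_ guarantees the key is present)
def pvVal (f : List (String × Int)) (var : String) : Int :=
  (pvLook? f var).getD 0

-- ===== PORT A =====
-- set(f[var] for f in filas_grupo)
def pvValores (filas : List (List (String × Int))) (var : String) : PySem.Set Int :=
  PySem.Set.ofList (filas.map (fun f => pvVal f var))

def simplificar_termino_grupo (celdas : List Int) (entradas : List String) (tabla : List (List (String × Int))) : String :=
  let filas_grupo := celdas.map (fun i => pvFila tabla i)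
  let termino := entradas.foldl (fun t var =>
      let valores := pvValores filas_grupo var
      if valores.length == 1 then
        let v := valores.headD 0          -- list(valores)[0], under the len == 1 guard
        t ++ (if v == 1 then var else var ++ "'")
      else t) ""
  if termino == "" then "1" else termino  -- 'termino if termino else "1"'

-- ===== PORT B =====
-- {(var, f[var]) for var in entradas}
def pvPares (entradas : List String) (f : List (String × Int)) : PySem.Set (String × Int) :=
  PySem.Set.ofList (entradas.map (fun v => (v, pvVal f v)))

def simplificar_termino_grupo_alt (celdas : List Int) (entradas : List String) (tabla : List (List (String × Int))) : String :=
  match celdas with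
  | [] => "1"
  | c0 :: rest =>
    -- comun = intersection of the per-row (var, value) pair sets, seeded with the first row
    let comun := rest.foldl (fun acc i => PySem.Set.inter acc (pvPares entradas (pvFila tabla i)))
                            (pvPares entradas (pvFila tabla c0))
    -- const = dict(comun); 'var in const' = lookup succeeds, 'const[var]' = its value
    let partes := (entradas.filter (fun var => (pvLook? comun var).isSome)).map
        (fun var => if (pvLook? comun var).getD 0 == 1 then var else var ++ "'")
    let termino := PySem.Str.join "" partes
    if termino == "" then "1" else termino

-- ===== PRECONDITION & SPEC =====
-- Pre_ excludes exactly the inputs where Python A raises: an index of celdas outside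
-- tabla's range (IndexError) or a variable of entradas missing from a selected row (KeyError).
def Pre_simplificar_termino_grupo (celdas : List Int) (entradas : List String) (tabla : List (List (String × Int))) : Prop :=
  ∀ i ∈ celdas, PySem.Raise.InRange tabla.length i ∧
    ∀ var ∈ entradas, (pvLook? (pvFila tabla i) var).isSome = true
instance (celdas : List Int) (entradas : List String) (tabla : List (List (String × Int))) : Decidable (Pre_simplificar_termino_grupo celdas entradas tabla) := by unfold Pre_simplificar_termino_grupo; infer_instance

def pvWitness_simplificar_termino_grupo : List Int × List String × (List (List (String × Int))) :=
  ([0, 1], ["A", "B"], [[("A", 1), ("B", 0)], [("A", 1), ("B", 1)]])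

def Spec_simplificar_termino_grupo (celdas : List Int) (entradas : List String) (tabla : List (List (String × Int))) (out : String) : Prop := out = simplificar_termino_grupo_alt celdas entradas tabla
instance (celdas : List Int) (entradas : List String) (tabla : List (List (String × Int))) (out : String) : Decidable (Spec_simplificar_termino_grupo celdas entradas tabla out) := by unfold Spec_simplificar_termino_grupo; infer_instance

-- ===== CLAIM (what is proved, stated in full; the proofs are below) =====
def Claim_equal_simplificar_termino_grupo : Prop := ∀ (celdas : List Int) (entradas : List String) (tabla : List (List (String × Int))), Dom_simplificar_termino_grupo celdas entradas tabla → Pre_simplificar_termino_grupo celdas entradas tabla → Spec_simplificar_termino_grupo celdas entradas tabla (simplificar_termino_grupo celdas entradas tabla)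

-- ===== LEMMAS AND PROOFS =====

lemma join_empty_cons (a : String) (l : List String) :
    PySem.Str.join "" (a :: l) = a ++ PySem.Str.join "" l := by
  cases l with
  | nil => simp [PySem.Str.join, PySem.Chars.join_singleton, PySem.Chars.join_nil]
  | cons b t => simp [PySem.Str.join, PySem.Chars.join_cons_cons]

-- A's accumulation loop builds exactly the ""-join of the kept, rendered variables
lemma foldl_str_build (P : String → Bool) (g : String → String) (l : List String) (acc : String) :
    l.foldl (fun t v => if P v then t ++ g v else t) acc
      = acc ++ PySem.Str.join "" ((l.filter P).map g) := by
  induction l generalizing acc with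
  | nil => simp [PySem.Str.join, PySem.Chars.join_nil]
  | cons v t ih => by_cases h : P v <;> simp [h, ih, join_empty_cons, String.append_assoc]

-- membership in B's running intersection
lemma mem_foldl_inter {α : Type} [BEq α] [LawfulBEq α] (g : Int → PySem.Set α)
    (l : List Int) (s : PySem.Set α) (x : α) :
    x ∈ l.foldl (fun acc i => PySem.Set.inter acc (g i)) s ↔ x ∈ s ∧ ∀ i ∈ l, x ∈ g i := by
  induction l generalizing s with
  | nil => simp
  | cons j t ih => simp [ih, PySem.Set.mem_inter]; tauto

lemma get?_isSome_iff (d : List (String × Int)) (k : String) :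
    (pvLook? d k).isSome = true ↔ ∃ x, (k, x) ∈ d := by
  simp [pvLook?, List.find?_isSome]

lemma get?_mem (d : List (String × Int)) (k : String) (x : Int) :
    pvLook? d k = some x → (k, x) ∈ d := by
  intro h
  unfold pvLook? at h
  obtain ⟨p, hp, he⟩ := Option.map_eq_some_iff.mp h
  have h2 : p.1 = k := by simpa using List.find?_some hp
  have h3 := List.mem_of_find?_eq_some hp
  have : (k, x) = p := by cases p; simp_all
  rw [this]; exact h3

lemma ofList_eq_singleton {α : Type} [BEq α] [LawfulBEq α] (a : α) (l : List α)
    (h : ∀ x ∈ l, x = a) : PySem.Set.ofList (a :: l) = [a] := by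
  rw [PySem.Set.ofList_eq_foldl]
  simp
  induction l with
  | nil => simp
  | cons x t ih =>
    have hx := h x (by simp)
    subst hx
    simp
    exact ih (fun y hy => h y (by simp [hy]))

-- A's 'len(valores) == 1' says: every later row agrees with the first
lemma ofList_len_one_iff {α : Type} [BEq α] [LawfulBEq α] (a : α) (l : List α) :
    (PySem.Set.ofList (a :: l)).length = 1 ↔ ∀ x ∈ l, x = a := by
  constructor
  · intro h1 x hx
    obtain ⟨y, hy⟩ := List.length_eq_one_iff.mp h1
    have ha : a ∈ PySem.Set.ofList (a :: l) := (PySem.Set.mem_ofList _ _).mpr (by simp)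
    have hxm : x ∈ PySem.Set.ofList (a :: l) := (PySem.Set.mem_ofList _ _).mpr (by simp [hx])
    rw [hy] at ha hxm
    simp at ha hxm
    rw [ha, hxm]
  · intro h; rw [ofList_eq_singleton a l h]; rfl

lemma mem_pares_iff (entradas : List String) (f : List (String × Int)) (var : String)
    (hv : var ∈ entradas) (x : Int) :
    (var, x) ∈ pvPares entradas f ↔ x = pvVal f var := by
  rw [pvPares, PySem.Set.mem_ofList]
  constructor
  · intro h
    obtain ⟨u, hu, he⟩ := List.mem_map.mp h
    obtain ⟨h1, h2⟩ := Prod.mk.injEq .. |>.mp he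
    rw [← h2, h1]
  · intro h
    exact List.mem_map.mpr ⟨var, hv, by rw [h]⟩

-- ===== VERDICT (by name: the statement is the Claim_ definition above) =====
theorem simplificar_termino_grupo_spec : Claim_equal_simplificar_termino_grupo := by
  intro celdas entradas tabla _ _
  unfold Spec_simplificar_termino_grupo
  cases celdas with
  | nil =>
    simp only [simplificar_termino_grupo, simplificar_termino_grupo_alt]
    rw [foldl_str_build (fun var => (pvValores ([].map (fun i => pvFila tabla i)) var).length == 1)
        (fun var => if (pvValores ([].map (fun i => pvFila tabla i)) var).headD 0 == 1 then var else var ++ "'")]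
    simp [pvValores, PySem.Str.join, PySem.Chars.join_nil]
  | cons c0 rest =>
    simp only [simplificar_termino_grupo, simplificar_termino_grupo_alt]
    rw [foldl_str_build (fun var => (pvValores ((c0 :: rest).map (fun i => pvFila tabla i)) var).length == 1)
        (fun var => if (pvValores ((c0 :: rest).map (fun i => pvFila tabla i)) var).headD 0 == 1 then var else var ++ "'")]
    set filas := (c0 :: rest).map (fun i => pvFila tabla i) with hfilas
    set comun := rest.foldl (fun acc i => PySem.Set.inter acc (pvPares entradas (pvFila tabla i)))
                            (pvPares entradas (pvFila tabla c0)) with hcomun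
    have hmap : ∀ var, filas.map (fun f => pvVal f var)
        = pvVal (pvFila tabla c0) var :: rest.map (fun i => pvVal (pvFila tabla i) var) := by
      intro var; simp [hfilas, List.map_map]
    have hcom : ∀ var ∈ entradas, ∀ x : Int, ((var, x) ∈ comun ↔
        (x = pvVal (pvFila tabla c0) var ∧ ∀ i ∈ rest, x = pvVal (pvFila tabla i) var)) := by
      intro var hv x
      rw [hcomun, mem_foldl_inter]
      constructor
      · rintro ⟨h0, hr⟩
        exact ⟨(mem_pares_iff _ _ _ hv x).mp h0, fun i hi => (mem_pares_iff _ _ _ hv x).mp (hr i hi)⟩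
      · rintro ⟨h0, hr⟩
        exact ⟨(mem_pares_iff _ _ _ hv x).mpr h0, fun i hi => (mem_pares_iff _ _ _ hv x).mpr (hr i hi)⟩
    have hiff : ∀ var ∈ entradas,
        (((pvValores filas var).length == 1) = (pvLook? comun var).isSome) := by
      intro var hv
      have hlen : (pvValores filas var).length = 1 ↔
          ∀ y ∈ rest.map (fun i => pvVal (pvFila tabla i) var), y = pvVal (pvFila tabla c0) var := by
        rw [pvValores, hmap var, ofList_len_one_iff]
      have hsome : (pvLook? comun var).isSome = true ↔ ∃ x, (var, x) ∈ comun := get?_isSome_iff _ _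
      have : ((pvValores filas var).length = 1) ↔ (pvLook? comun var).isSome = true := by
        rw [hlen, hsome]
        constructor
        · intro h
          refine ⟨pvVal (pvFila tabla c0) var, (hcom var hv _).mpr ⟨rfl, fun i hi => ?_⟩⟩
          exact (h _ (List.mem_map.mpr ⟨i, hi, rfl⟩)).symm
        · rintro ⟨x, hx⟩
          obtain ⟨h0, hall⟩ := (hcom var hv x).mp hx
          intro y hy
          obtain ⟨i, hi, rfl⟩ := List.mem_map.mp hy
          rw [← hall i hi, h0]
      rw [Bool.eq_iff_iff]
      simpa using this
    have hval : ∀ var ∈ entradas, ((pvValores filas var).length == 1) = true →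
        (pvValores filas var).headD 0 = (pvLook? comun var).getD 0 := by
      intro var hv h
      have hlen : (pvValores filas var).length = 1 := by simpa using h
      have hall := (by rw [pvValores, hmap var, ofList_len_one_iff] at hlen; exact hlen :
        ∀ y ∈ rest.map (fun i => pvVal (pvFila tabla i) var), y = pvVal (pvFila tabla c0) var)
      have h1 : pvValores filas var = [pvVal (pvFila tabla c0) var] := by
        rw [pvValores, hmap var]; exact ofList_eq_singleton _ _ hall
      have hsome : (pvLook? comun var).isSome = true := by rw [← hiff var hv]; exact h
      obtain ⟨x, hx⟩ := Option.isSome_iff_exists.mp hsome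
      have hxv : x = pvVal (pvFila tabla c0) var := ((hcom var hv x).mp (get?_mem _ _ _ hx)).1
      rw [h1, hx, hxv]; rfl
    have hfilter : entradas.filter (fun var => (pvValores filas var).length == 1)
        = entradas.filter (fun var => (pvLook? comun var).isSome) := by
      exact List.filter_congr (fun var hv => hiff var hv)
    have hparts : (entradas.filter (fun var => (pvValores filas var).length == 1)).map
          (fun var => if (pvValores filas var).headD 0 == 1 then var else var ++ "'")
        = (entradas.filter (fun var => (pvLook? comun var).isSome)).map
          (fun var => if (pvLook? comun var).getD 0 == 1 then var else var ++ "'") := by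
      rw [← hfilter]
      apply List.map_congr_left
      intro var hvf
      have hm := List.mem_filter.mp hvf
      rw [hval var hm.1 hm.2]
    rw [hparts]
    simp
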